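-- pv_equiv track=rewrite | github.com/jernejjanez/advent-of-code | 2023/day-14/day14.py | move_rocks_and_calculate_load
-- ===== SOURCE A (Python) =====
-- def move_rocks_and_calculate_load(line):
--     _sum = 0
--     load = len(line)
--     current_available_position = 0
--     for i in range(len(line)):
--         if line[i] == "O":
--             _sum += load - current_available_position
--             current_available_position += 1
--         elif line[i] == "#":
--             current_available_position = i + 1
--     return _sum
-- ===== SOURCE B (Python) =====
-- def move_rocks_and_calculate_load(line):
--     total = 0
--     s = 0  # start index of the current wall-delimited segment
--     k = 0  # number of 'O' rocks seen in the current segment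
--     length = len(line)
--     for i, c in enumerate(line):
--         if c == "#":
--             total += k * length - k * s - k * (k - 1) // 2
--             s = i + 1
--             k = 0
--         elif c == "O":
--             k += 1
--     total += k * length - k * s - k * (k - 1) // 2
--     return total
-- ===== Notes on version B (the rewrite author's own statement) =====
-- stated objective: alternative
-- what changed: B groups rocks per wall-delimited segment and adds each segment's load with the arithmetic-series closed form k*len - k*s - k*(k-1)//2, instead of A's per-rock running add against a moving available position.
import Mathlib
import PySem

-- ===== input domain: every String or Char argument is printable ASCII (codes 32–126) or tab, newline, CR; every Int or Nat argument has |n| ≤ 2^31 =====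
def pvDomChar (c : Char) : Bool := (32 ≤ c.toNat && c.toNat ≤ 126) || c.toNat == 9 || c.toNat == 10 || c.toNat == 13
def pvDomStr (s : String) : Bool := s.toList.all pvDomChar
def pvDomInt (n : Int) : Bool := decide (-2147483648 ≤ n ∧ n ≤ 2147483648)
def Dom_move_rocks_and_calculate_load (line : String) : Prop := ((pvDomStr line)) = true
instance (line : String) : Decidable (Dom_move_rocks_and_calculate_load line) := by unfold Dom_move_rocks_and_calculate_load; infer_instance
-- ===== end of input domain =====

-- B replaces A's per-rock running addition by per-segment closed-form (arithmetic series) sums: an alternative decomposition of the same O(n) scan.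


-- ===== PORT A =====
-- loop body of A: state = (_sum, current_available_position), p = (i, line[i])
def pvStepA (load : Int) (st : Int × Int) (p : Int × Char) : Int × Int :=
  if p.2 = 'O' then (st.1 + (load - st.2), st.2 + 1)
  else if p.2 = '#' then (st.1, p.1 + 1)
  else st

def move_rocks_and_calculate_load (line : String) : Int :=
  let cs := line.toList
  let load : Int := cs.length
  -- for i in range(len(line)): ... line[i] ...  (i is always in range, so line[i] = pyGetD cs i ' ')
  let st := (PySem.List.pyRange 0 (PySem.List.len cs) 1).foldl
      (fun st i => pvStepA load st (i, PySem.List.pyGetD cs i ' ')) (0, 0)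
  st.1

-- ===== PORT B =====
-- k*(k-1)//2
def pvT (k : Int) : Int := PySem.Int.floordiv (k * (k - 1)) 2
-- loop body of B: state = (total, s, k), p = (i, c)
def pvStepB (length : Int) (st : Int × Int × Int) (p : Int × Char) : Int × Int × Int :=
  if p.2 = '#' then (st.1 + (st.2.2 * length - st.2.2 * st.2.1 - pvT st.2.2), p.1 + 1, 0)
  else if p.2 = 'O' then (st.1, st.2.1, st.2.2 + 1)
  else st
-- final flush of the last segment
def pvFlush (length : Int) (st : Int × Int × Int) : Int :=
  st.1 + (st.2.2 * length - st.2.2 * st.2.1 - pvT st.2.2)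

def move_rocks_and_calculate_load_alt (line : String) : Int :=
  let cs := line.toList
  let length : Int := cs.length
  let st := (PySem.List.enumerate cs).foldl (pvStepB length) (0, 0, 0)
  pvFlush length st

-- ===== PRECONDITION & SPEC =====
def Spec_move_rocks_and_calculate_load (line : String) (out : Int) : Prop := out = move_rocks_and_calculate_load_alt line
instance (line : String) (out : Int) : Decidable (Spec_move_rocks_and_calculate_load line out) := by unfold Spec_move_rocks_and_calculate_load; infer_instance

-- ===== CLAIM (what is proved, stated in full; the proofs are below) =====
def Claim_equal_move_rocks_and_calculate_load : Prop := ∀ (line : String), Dom_move_rocks_and_calculate_load line → Spec_move_rocks_and_calculate_load line (move_rocks_and_calculate_load line)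

-- ===== LEMMAS AND PROOFS =====

lemma pvA_enum (cs : List Char) (L : Int) :
    (PySem.List.pyRange 0 (PySem.List.len cs) 1).foldl
      (fun st i => pvStepA L st (i, PySem.List.pyGetD cs i ' ')) ((0:Int), (0:Int))
    = (PySem.List.enumerate cs).foldl (pvStepA L) (0, 0) := by
  rw [PySem.List.enumerate_eq_map_pyRange cs ' ', List.foldl_map]

lemma pvT_zero : pvT 0 = 0 := by decide

lemma pvT_succ (k : Int) (_hk : 0 ≤ k) : pvT (k + 1) = pvT k + k := by
  unfold pvT
  have h2 : (0:Int) < 2 := by omega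
  have h1 : PySem.Int.floordiv ((k + 1) * (k + 1 - 1)) 2 = ((k + 1) * (k + 1 - 1)) / 2 :=
    PySem.Int.floordiv_eq_ediv_of_pos h2
  rw [h1, PySem.Int.floordiv_eq_ediv_of_pos h2]
  have : (k + 1) * (k + 1 - 1) = k * (k - 1) + k * 2 := by ring
  rw [this, Int.add_mul_ediv_right _ _ (by omega : (2:Int) ≠ 0)]

-- loop invariant: A's state (sum, cap) corresponds to B's (tot, s, k) via
-- cap = s + k, sum = tot + (k*L - k*s - T k); then A's final sum = flush of B's final state.
lemma pvLoop (L : Int) : ∀ (cs : List Char) (i sum cap tot s k : Int),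
    cap = s + k → 0 ≤ k → sum = tot + (k * L - k * s - pvT k) →
    ((PySem.List.enumerate cs i).foldl (pvStepA L) (sum, cap)).1
      = pvFlush L ((PySem.List.enumerate cs i).foldl (pvStepB L) (tot, s, k)) := by
  intro cs
  induction cs with
  | nil =>
    intro i sum cap tot s k hcap hk hsum
    simp [PySem.List.enumerate_nil, pvFlush, hsum]
  | cons c cs ih =>
    intro i sum cap tot s k hcap hk hsum
    rw [PySem.List.enumerate_cons, List.foldl_cons, List.foldl_cons]
    by_cases hO : c = 'O'
    · have hA : pvStepA L (sum, cap) (i, c) = (sum + (L - cap), cap + 1) := by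
        simp [pvStepA, hO]
      have hB : pvStepB L (tot, s, k) (i, c) = (tot, s, k + 1) := by
        simp [pvStepB, hO]
      rw [hA, hB]
      apply ih
      · omega
      · omega
      · rw [pvT_succ k hk]; rw [hsum, hcap]; ring
    · by_cases hH : c = '#'
      · have hA : pvStepA L (sum, cap) (i, c) = (sum, i + 1) := by
          simp [pvStepA, hH]
        have hB : pvStepB L (tot, s, k) (i, c)
            = (tot + (k * L - k * s - pvT k), i + 1, 0) := by
          simp [pvStepB, hH]
        rw [hA, hB]
        apply ih
        · omega
        · omega
        · rw [pvT_zero]; omega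
      · have hA : pvStepA L (sum, cap) (i, c) = (sum, cap) := by
          simp [pvStepA, hO, hH]
        have hB : pvStepB L (tot, s, k) (i, c) = (tot, s, k) := by
          simp [pvStepB, hO, hH]
        rw [hA, hB]
        exact ih _ _ _ _ _ _ hcap hk hsum

-- ===== VERDICT (by name: the statement is the Claim_ definition above) =====
theorem move_rocks_and_calculate_load_spec : Claim_equal_move_rocks_and_calculate_load := by
  intro line _
  unfold Spec_move_rocks_and_calculate_load move_rocks_and_calculate_load move_rocks_and_calculate_load_alt
  dsimp only
  rw [pvA_enum]
  exact pvLoop _ line.toList 0 0 0 0 0 0 (by omega) (by omega) (by simp [pvT_zero])
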